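-- pv_equiv track=rewrite | github.com/Vexiona/metrical-viewer | src/annotate.py | parse_syllables
-- ===== SOURCE A (Python) =====
-- def parse_syllables(text):
--     """Parse verse text into syllables with word-boundary info.
--
--     Delimiters:
--         space = syllable break + word boundary
--         #     = syllable break within a word
--
--     Returns list of (text, is_wordend) tuples.
--     """
--     syllables = []
--     current = []
--
--     for ch in text:
--         if ch == '#':
--             syllables.append((''.join(current), False))
--             current = []
--         elif ch == ' ':
--             syllables.append((''.join(current), True))
--             current = []
--         else:
--             current.append(ch)
--
--     if current:
--         syllables.append((''.join(current), False))
--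
--     return syllables
-- ===== SOURCE B (Python) =====
-- def parse_syllables(text):
--     """Parse verse text into syllables with word-boundary info.
--
--     Recursive decomposition: find the first delimiter, emit the prefix
--     as a syllable (word end iff the delimiter is a space), recurse on
--     the rest; a non-empty delimiter-free tail is one final syllable.
--     """
--     for j, ch in enumerate(text):
--         if ch in ' #':
--             return [(text[:j], ch == ' ')] + parse_syllables(text[j + 1:])
--     return [(text, False)] if text else []
-- ===== Notes on version B (the rewrite author's own statement) =====
-- stated objective: alternative
-- what changed: Replaced the per-character loop with a mutable buffer by a recursive split-at-first-delimiter decomposition that emits whole slices; no accumulator state is maintained.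
import Mathlib
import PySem

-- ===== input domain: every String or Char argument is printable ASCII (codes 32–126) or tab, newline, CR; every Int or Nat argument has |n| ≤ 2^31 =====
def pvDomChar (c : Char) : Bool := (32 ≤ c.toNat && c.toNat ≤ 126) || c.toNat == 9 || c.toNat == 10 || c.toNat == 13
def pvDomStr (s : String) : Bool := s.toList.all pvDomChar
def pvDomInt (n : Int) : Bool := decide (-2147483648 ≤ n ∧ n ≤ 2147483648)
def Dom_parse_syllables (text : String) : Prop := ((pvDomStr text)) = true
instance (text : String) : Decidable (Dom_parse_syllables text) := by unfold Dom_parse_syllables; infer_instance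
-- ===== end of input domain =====

-- B replaces A's per-character buffer loop by a recursive split-at-first-delimiter
-- decomposition; same return value, alternative structure (no speed claim).

-- ===== PORT A =====
-- state = (syllables so far, current buffer); literal port of A's for-loop
def pvAStep (st : List (String × Bool) × List Char) (ch : Char) :
    List (String × Bool) × List Char :=
  if ch = '#' then (st.1 ++ [(String.mk st.2, false)], [])
  else if ch = ' ' then (st.1 ++ [(String.mk st.2, true)], [])
  else (st.1, st.2 ++ [ch])

def parse_syllables (text : String) : List (String × Bool) :=
  let st := text.toList.foldl pvAStep ([], [])
  if st.2 = [] then st.1 else st.1 ++ [(String.mk st.2, false)]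

-- ===== PORT B =====
-- split at the first delimiter: some (prefix, delimiter, rest), none if delimiter-free
def pvSplitFirst : List Char → Option (List Char × Char × List Char)
  | [] => none
  | c :: rest =>
    if c = ' ' ∨ c = '#' then some ([], c, rest)
    else match pvSplitFirst rest with
      | none => none
      | some (p, d, s) => some (c :: p, d, s)

theorem pvSplitFirst_len : ∀ (cs p : List Char) (d : Char) (s : List Char),
    pvSplitFirst cs = some (p, d, s) → s.length < cs.length := by
  intro cs
  induction cs with
  | nil => intro p d s h; simp [pvSplitFirst] at h
  | cons c rest ih =>
    intro p d s h
    simp only [pvSplitFirst] at h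
    split at h
    · simp only [Option.some.injEq, Prod.mk.injEq] at h
      obtain ⟨_, _, rfl⟩ := h
      simp
    · cases hr : pvSplitFirst rest with
      | none => rw [hr] at h; simp at h
      | some v =>
        obtain ⟨p', d', s'⟩ := v
        rw [hr] at h
        simp only [Option.some.injEq, Prod.mk.injEq] at h
        obtain ⟨_, _, rfl⟩ := h
        exact Nat.lt_succ_of_lt (ih p' d' s' hr)

def pvAltGo (cs : List Char) : List (String × Bool) :=
  match h : pvSplitFirst cs with
  | none => if cs = [] then [] else [(String.mk cs, false)]
  | some (p, d, s) => (String.mk p, d = ' ') :: pvAltGo s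
termination_by cs.length
decreasing_by exact pvSplitFirst_len cs p d s h

def parse_syllables_alt (text : String) : List (String × Bool) :=
  pvAltGo text.toList

-- ===== PRECONDITION & SPEC =====
def Spec_parse_syllables (text : String) (out : List (String × Bool)) : Prop := out = parse_syllables_alt text
instance (text : String) (out : List (String × Bool)) : Decidable (Spec_parse_syllables text out) := by unfold Spec_parse_syllables; infer_instance

-- ===== CLAIM (what is proved, stated in full; the proofs are below) =====
def Claim_equal_parse_syllables : Prop := ∀ (text : String), Dom_parse_syllables text → Spec_parse_syllables text (parse_syllables text)

-- ===== LEMMAS AND PROOFS =====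

-- A's semantics as a structural recursion over (buffer, remaining chars)
def pvG (cur : List Char) : List Char → List (String × Bool)
  | [] => if cur = [] then [] else [(String.mk cur, false)]
  | c :: cs =>
    if c = '#' then (String.mk cur, false) :: pvG [] cs
    else if c = ' ' then (String.mk cur, true) :: pvG [] cs
    else pvG (cur ++ [c]) cs

theorem pvFold_eq_g : ∀ (cs : List Char) (syl : List (String × Bool)) (cur : List Char),
    (let st := cs.foldl pvAStep (syl, cur)
     if st.2 = [] then st.1 else st.1 ++ [(String.mk st.2, false)]) = syl ++ pvG cur cs := by
  intro cs
  induction cs with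
  | nil =>
    intro syl cur
    simp only [List.foldl, pvG]
    split <;> simp_all
  | cons c cs ih =>
    intro syl cur
    simp only [List.foldl, pvAStep, pvG]
    by_cases h1 : c = '#'
    · simp [h1, ih]
    · by_cases h2 : c = ' '
      · simp [h1, h2, ih]
      · simp [h1, h2, ih]

theorem pvSplitFirst_none (cur : List Char) (hs : ' ' ∉ cur) (hh : '#' ∉ cur) :
    pvSplitFirst cur = none := by
  induction cur with
  | nil => rfl
  | cons c cs ih =>
    simp only [List.mem_cons, not_or] at hs hh
    simp only [pvSplitFirst]
    rw [if_neg (by rintro (rfl | rfl); exact hs.1 rfl; exact hh.1 rfl)]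
    rw [ih hs.2 hh.2]

theorem pvSplitFirst_delim (cur : List Char) (c : Char) (cs : List Char)
    (hs : ' ' ∉ cur) (hh : '#' ∉ cur) (hc : c = ' ' ∨ c = '#') :
    pvSplitFirst (cur ++ c :: cs) = some (cur, c, cs) := by
  induction cur with
  | nil => simp [pvSplitFirst, hc]
  | cons a rest ih =>
    simp only [List.mem_cons, not_or] at hs hh
    simp only [List.cons_append, pvSplitFirst]
    rw [if_neg (by rintro (rfl | rfl); exact hs.1 rfl; exact hh.1 rfl)]
    rw [ih hs.2 hh.2]

theorem pvG_eq_altGo : ∀ (cs cur : List Char), ' ' ∉ cur → '#' ∉ cur →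
    pvG cur cs = pvAltGo (cur ++ cs) := by
  intro cs
  induction cs with
  | nil =>
    intro cur hs hh
    rw [List.append_nil, pvAltGo.eq_def, pvSplitFirst_none cur hs hh]
    simp [pvG]
  | cons c cs ih =>
    intro cur hs hh
    by_cases h1 : c = '#'
    · rw [pvAltGo.eq_def]
      rw [pvSplitFirst_delim cur c cs hs hh (Or.inr h1)]
      simp only [pvG, h1, if_pos rfl]
      rw [ih [] (by simp) (by simp)]
      simp [h1]
    · by_cases h2 : c = ' '
      · rw [pvAltGo.eq_def]
        rw [pvSplitFirst_delim cur c cs hs hh (Or.inl h2)]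
        simp only [pvG, h1, h2, if_neg h1, if_pos rfl]
        rw [ih [] (by simp) (by simp)]
        simp [h2]
      · have := ih (cur ++ [c])
          (by simp [hs]; rintro rfl; exact h2 rfl)
          (by simp [hh]; rintro rfl; exact h1 rfl)
        simp only [pvG, if_neg h1, if_neg h2]
        rw [this]
        simp

-- ===== VERDICT (by name: the statement is the Claim_ definition above) =====
theorem parse_syllables_spec : Claim_equal_parse_syllables := by
  intro text _
  unfold Spec_parse_syllables parse_syllables parse_syllables_alt
  rw [pvFold_eq_g text.toList [] []]
  rw [pvG_eq_altGo text.toList [] (by simp) (by simp)]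
  simp
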